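-- pv_equiv track=rewrite | github.com/mbuhidar/retro_typein_tools | src/debug_tokenize/debug_tokenize.py | ahoy2_checksum
-- ===== SOURCE A (Python) =====
-- def ahoy2_checksum(byte_list):
--     '''
--     Function to create Ahoy checksums from passed in byte list to match the
--     codes printed in the magazine to check each line for typed in accuracy.
--     Covers Ahoy Bug Repellent version for May 1984-Apr 1987 issues.
--     '''
--
--     xor_value = 0
--     char_position = 1
--     carry_flag = 1
--     in_quotes = False
--
--     for char_val in byte_list:
--
--         # set carry flag to zero for char values less than ascii value for
--         # quote character since assembly code for repellent sets carry flag
--         # based on cmp 0x22 (decimal 34)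
--         if char_val < 34:
--             carry_flag = 0
--         else:
--             carry_flag = 1
--
--         # Detect quote symbol in line and toggle in-quotes flag
--         if char_val == 34:
--             in_quotes = not in_quotes
--
--         # Detect spaces that are outside of quotes and ignore them, else
--         # execute primary checksum generation algorithm
--         if char_val == 32 and in_quotes is False:
--             continue
--         else:
--             next_value = char_val + xor_value + carry_flag
--
--             xor_value = next_value ^ char_position
--
--             # limit next value to fit in one byte
--             next_value = next_value & 255
--
--             char_position = char_position + 1
--
--     # get high nibble of xor_value
--     high_nib = (xor_value & 0xf0) >> 4
--     high_char_val = high_nib + 65  # 0x41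
--     # get low nibble of xor_value
--     low_nib = xor_value & 0x0f
--     low_char_val = low_nib + 65  # 0x41
--     checksum = chr(high_char_val) + chr(low_char_val)
--     return checksum
-- ===== SOURCE B (Python) =====
-- def ahoy2_checksum(byte_list):
--     # Split the line on quote bytes (34); segments at even index lie outside
--     # quotes, so the per-byte quote toggle disappears into segment parity.
--     segments = []
--     cur = []
--     for c in byte_list:
--         if c == 34:
--             segments.append(cur)
--             cur = []
--         else:
--             cur.append(c)
--     segments.append(cur)
--     # Rebuild the participating byte stream: re-insert the quote byte before
--     # every segment but the first, and drop spaces in even (outside) segments.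
--     stream = []
--     for i, seg in enumerate(segments):
--         if i > 0:
--             stream.append(34)
--         if i % 2 == 0:
--             stream.extend(c for c in seg if c != 32)
--         else:
--             stream.extend(seg)
--     # One fold computes the positional xor checksum over the stream.
--     x = 0
--     p = 1
--     for c in stream:
--         x = (c + x + (1 if c >= 34 else 0)) ^ p
--         p += 1
--     return chr(((x & 0xf0) >> 4) + 65) + chr((x & 0x0f) + 65)
-- ===== Notes on version B (the rewrite author's own statement) =====
-- stated objective: alternative
-- what changed: Replaces A's single stateful loop (quote toggle, carry, position all updated per byte) by splitting the line into segments at every quote byte, so the in-quotes state becomes the PARITY of the segment index: segments are reassembled (quote bytes re-inserted, spaces dropped only in even/outside segments) and one fold computes the positional xor checksum; the dead 'next_value & 255' line is dropped.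
import Mathlib
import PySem

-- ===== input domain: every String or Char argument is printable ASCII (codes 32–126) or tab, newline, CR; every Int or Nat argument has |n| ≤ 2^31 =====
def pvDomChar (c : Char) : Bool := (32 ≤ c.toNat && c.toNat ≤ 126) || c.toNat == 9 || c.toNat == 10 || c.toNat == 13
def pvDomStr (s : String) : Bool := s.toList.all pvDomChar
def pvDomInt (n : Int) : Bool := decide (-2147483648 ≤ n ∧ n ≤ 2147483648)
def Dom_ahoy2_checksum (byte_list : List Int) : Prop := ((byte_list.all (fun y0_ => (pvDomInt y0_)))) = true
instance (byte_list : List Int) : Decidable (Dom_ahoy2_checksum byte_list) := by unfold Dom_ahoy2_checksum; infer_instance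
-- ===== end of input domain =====

-- B replaces A's per-byte quote-toggle loop by splitting the line on quote bytes:
-- in-quotes becomes segment-index parity, segments are reassembled into the
-- participating stream and one fold computes the checksum (alternative decomposition).

-- ===== PORT A =====
-- one iteration of A's loop; state = (xor_value, char_position, carry_flag, in_quotes)
def ahoyAStep (s : Int × Int × Int × Bool) (char_val : Int) : Int × Int × Int × Bool :=
  let carry_flag : Int := if char_val < 34 then 0 else 1
  let in_quotes : Bool := if char_val == 34 then !s.2.2.2 else s.2.2.2
  if char_val == 32 && in_quotes == false then
    (s.1, s.2.1, carry_flag, in_quotes)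
  else
    let next_value := char_val + s.1 + carry_flag
    let xor_value := PySem.Int.bxor next_value s.2.1
    let _next_value := PySem.Int.band next_value 255  -- dead in A, kept for fidelity
    (xor_value, s.2.1 + 1, carry_flag, in_quotes)

def ahoy2_checksum (byte_list : List Int) : String :=
  let st := byte_list.foldl ahoyAStep (0, 1, 1, false)
  let xor_value := st.1
  let high_nib := (PySem.Int.band xor_value 0xf0) >>> 4
  let high_char_val := high_nib + 65
  let low_nib := PySem.Int.band xor_value 0x0f
  let low_char_val := low_nib + 65
  String.ofList [Char.ofNat high_char_val.toNat, Char.ofNat low_char_val.toNat]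

-- ===== PORT B =====
-- Source B loop 1: split the line on quote bytes; state = (segments, cur)
def ahoySplitStep (s : List (List Int) × List Int) (c : Int) : List (List Int) × List Int :=
  if c == 34 then (s.1 ++ [s.2], []) else (s.1, s.2 ++ [c])

-- Source B loop 2: extend the stream from one (index, segment) pair of enumerate(segments)
def ahoyStreamStep (acc : List Int) (iseg : Int × List Int) : List Int :=
  let acc := if iseg.1 > 0 then acc ++ [34] else acc
  if iseg.1 % 2 == 0 then acc ++ iseg.2.filter (fun c => c != 32) else acc ++ iseg.2

-- Source B loop 3: the checksum fold; state = (x, p)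
def ahoyFoldStep (s : Int × Int) (c : Int) : Int × Int :=
  (PySem.Int.bxor (c + s.1 + (if c ≥ 34 then 1 else 0)) s.2, s.2 + 1)

def ahoy2_checksum_alt (byte_list : List Int) : String :=
  let sp := byte_list.foldl ahoySplitStep ([], [])
  let segments := sp.1 ++ [sp.2]
  let stream := (PySem.List.enumerate segments).foldl ahoyStreamStep []
  let x := (stream.foldl ahoyFoldStep (0, 1)).1
  String.ofList [Char.ofNat (((PySem.Int.band x 0xf0) >>> 4) + 65).toNat,
                 Char.ofNat ((PySem.Int.band x 0x0f) + 65).toNat]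

-- ===== PRECONDITION & SPEC =====
def Spec_ahoy2_checksum (byte_list : List Int) (out : String) : Prop := out = ahoy2_checksum_alt byte_list
instance (byte_list : List Int) (out : String) : Decidable (Spec_ahoy2_checksum byte_list out) := by unfold Spec_ahoy2_checksum; infer_instance

-- ===== CLAIM =====
def Claim_equal_ahoy2_checksum : Prop := ∀ (byte_list : List Int), Dom_ahoy2_checksum byte_list → Spec_ahoy2_checksum byte_list (ahoy2_checksum byte_list)

-- ===== LEMMAS AND PROOFS =====

-- proof-side characterisation: the bytes that participate in the checksum,
-- given the current in-quotes state
def ahoyKept : List Int → Bool → List Int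
  | [], _ => []
  | c :: l, q =>
    let q' := if c == 34 then !q else q
    if c != 32 || q' then c :: ahoyKept l q' else ahoyKept l q'

-- stream rebuild of a segment list (B's loop 2), abbreviated for the proofs
def ahoyRebuild (ss : List (List Int)) : List Int :=
  (PySem.List.enumerate ss).foldl ahoyStreamStep []

theorem ahoyRebuild_snoc (ss : List (List Int)) (t : List Int) :
    ahoyRebuild (ss ++ [t]) = ahoyStreamStep (ahoyRebuild ss) ((ss.length : Int), t) := by
  simp [ahoyRebuild, PySem.List.enumerate_append]

theorem ahoyParity_succ (n : Nat) :
    ((((n : Int) + 1) % 2 == 1)) = !(((n : Int)) % 2 == 1) := by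
  by_cases h : (n : Int) % 2 = 1
  · have h2 : ((n : Int) + 1) % 2 = 0 := by omega
    simp [h, h2]
  · have h2 : ((n : Int) + 1) % 2 = 1 := by omega
    simp [h, h2]

-- core lemma: rebuilding the segments produced by the split fold appends exactly
-- the kept bytes, with in-quotes = parity of the pending segment's index
theorem ahoy_split_rebuild (l : List Int) (segs : List (List Int)) (cur : List Int) :
    ahoyRebuild ((l.foldl ahoySplitStep (segs, cur)).1 ++ [(l.foldl ahoySplitStep (segs, cur)).2]) =
      ahoyRebuild (segs ++ [cur]) ++ ahoyKept l (((segs.length : Int) % 2 == 1)) := by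
  induction l generalizing segs cur with
  | nil => simp [ahoyKept]
  | cons c l ih =>
    by_cases h34 : c = 34
    · subst h34
      simp only [List.foldl_cons, ahoySplitStep, beq_self_eq_true, if_true]
      rw [ih]
      have hre : ahoyRebuild ((segs ++ [cur]) ++ [[]]) = ahoyRebuild (segs ++ [cur]) ++ [34] := by
        rw [ahoyRebuild_snoc]
        simp only [ahoyStreamStep, List.length_append, List.length_cons, List.length_nil]
        have hpos : (0 : Int) < ((segs.length + 1 : Nat) : Int) := by positivity
        rw [if_pos hpos]
        split <;> simp
      have hlen : (((segs ++ [cur]).length : Nat) : Int) = (segs.length : Int) + 1 := by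
        simp
      rw [hre]
      show _ = _ ++ ahoyKept (34 :: l) _
      simp only [ahoyKept, beq_self_eq_true, if_true, hlen, ahoyParity_succ]
      have hk : ((34 : Int) != 32 || !((segs.length : Int) % 2 == 1)) = true := by simp
      rw [if_pos hk]
      simp
    · have hb : (c == 34) = false := by simp [h34]
      simp only [List.foldl_cons, ahoySplitStep, hb, Bool.false_eq_true, if_false]
      rw [ih]
      show _ = _ ++ ahoyKept (c :: l) _
      simp only [ahoyKept, hb, Bool.false_eq_true, if_false]
      rw [ahoyRebuild_snoc, ahoyRebuild_snoc]
      simp only [ahoyStreamStep]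
      by_cases hq : ((segs.length : Int) % 2 = 1)
      · have e0 : (((segs.length : Int)) % 2 == 0) = false := by
          rw [beq_eq_false_iff_ne]; omega
        have e1 : (((segs.length : Int)) % 2 == 1) = true := by simp [hq]
        simp [e0, e1, List.append_assoc]
      · have e0 : (((segs.length : Int)) % 2 == 0) = true := by
          rw [beq_iff_eq]; omega
        have e1 : (((segs.length : Int)) % 2 == 1) = false := by
          rw [beq_eq_false_iff_ne]; exact hq
        by_cases h32 : c = 32
        · subst h32
          simp [e0, e1, List.filter_append]
        · have hf : List.filter (fun c => c != 32) [c] = [c] := by simp [h32]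
          simp [e0, e1, List.filter_append, hf, h32, List.append_assoc]

-- the (xor, pos) components of A's fold equal B's checksum fold over the kept bytes
theorem ahoy_loop_eq (l : List Int) (x p cf : Int) (q : Bool) :
    ((l.foldl ahoyAStep (x, p, cf, q)).1, (l.foldl ahoyAStep (x, p, cf, q)).2.1) =
      (ahoyKept l q).foldl ahoyFoldStep (x, p) := by
  induction l generalizing x p cf q with
  | nil => simp [ahoyKept]
  | cons c l ih =>
    have hcarry : (if c < 34 then (0:Int) else 1) = (if c ≥ 34 then 1 else 0) := by
      split_ifs <;> omega
    simp only [List.foldl_cons, ahoyAStep, ahoyKept]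
    by_cases h34 : c = 34
    · subst h34
      simp [ahoyFoldStep, ih]
    · by_cases h32 : c = 32
      · subst h32
        cases q
        · simp [ih]
        · simp [ih, ahoyFoldStep]
      · simp [h34, h32, ih, ahoyFoldStep, hcarry]

theorem ahoy2_checksum_spec : Claim_equal_ahoy2_checksum := by
  intro bl _
  unfold Spec_ahoy2_checksum ahoy2_checksum ahoy2_checksum_alt
  have hstream :
      (PySem.List.enumerate ((bl.foldl ahoySplitStep ([], [])).1 ++ [(bl.foldl ahoySplitStep ([], [])).2])).foldl ahoyStreamStep [] =
        ahoyKept bl false := by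
    have := ahoy_split_rebuild bl [] []
    simpa [ahoyRebuild, PySem.List.enumerate, ahoyStreamStep] using this
  have h1 : (bl.foldl ahoyAStep (0, 1, 1, false)).1 =
      ((ahoyKept bl false).foldl ahoyFoldStep (0, 1)).1 :=
    congrArg Prod.fst (ahoy_loop_eq bl 0 1 1 false)
  simp only [hstream, h1]
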